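-- pv_equiv track=rewrite | github.com/Hyuoo/ReZeroPS | Programmers/L2/p131704.py | solution
-- ===== SOURCE A (Python) =====
-- def solution(order):
--     s = []
--     i = 1
--     count = 0
--     for o in order:
--         if i<o:
--             s.extend(list(range(i,o)))
--             i=o
--         if i==o:
--             i+=1
--         elif i>o and s and s[-1]==o:
--             s.pop()
--         else:
--             break
--         count+=1
--     return count
-- ===== SOURCE B (Python) =====
-- def solution(order):
--     # Stack-free: a box o can be taken iff it is fresh off the belt (o > m, the
--     # highest box fed so far) or it is the top of the side stack, which equals
--     # {1..m} minus the boxes already taken -- i.e. o is in 1..m, untaken, and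
--     # every box between o and m has already been taken.
--     taken = set()
--     m = 0
--     count = 0
--     for o in order:
--         if o > m:
--             m = o
--         elif not (1 <= o and o not in taken and all(x in taken for x in range(o + 1, m + 1))):
--             break
--         taken.add(o)
--         count += 1
--     return count
-- ===== Notes on version B (the rewrite author's own statement) =====
-- stated objective: alternative
-- what changed: Replaced A's explicit side-stack simulation (list with extend(range)/pop) by a stack-free pass that maintains only the set of taken boxes and the belt maximum m, accepting o iff o > m or o lies in 1..m, is untaken, and every box in (o, m] is already taken.
import Mathlib
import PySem

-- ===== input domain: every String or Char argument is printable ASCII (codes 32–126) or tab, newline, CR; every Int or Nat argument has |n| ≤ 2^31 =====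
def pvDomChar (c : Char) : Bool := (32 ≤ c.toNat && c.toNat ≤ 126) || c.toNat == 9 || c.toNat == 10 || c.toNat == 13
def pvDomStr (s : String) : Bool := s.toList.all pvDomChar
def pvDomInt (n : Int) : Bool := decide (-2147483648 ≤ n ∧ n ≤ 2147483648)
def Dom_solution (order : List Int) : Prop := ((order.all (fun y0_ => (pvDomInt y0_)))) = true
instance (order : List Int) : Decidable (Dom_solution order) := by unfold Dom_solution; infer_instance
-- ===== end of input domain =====

-- B drops A's explicit side stack entirely: it keeps only the set of boxes already
-- taken and the highest box fed from the belt, deciding each step by an interval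
-- test; objective: alternative (different data structure), same behaviour.

-- ===== PORT A =====
-- A's for-loop with early break: state (s, i, count); each step may extend s by range(i,o).
def solutionLoop : List Int → List Int → Int → Int → Int
  | [], _, _, count => count
  | o :: rest, s, i, count =>
    -- 'if i<o: s.extend(list(range(i,o))); i=o'
    let p := if i < o then (s ++ PySem.List.pyRange i o 1, o) else (s, i)
    if p.2 = o then solutionLoop rest p.1 (p.2 + 1) (count + 1)
    else if p.2 > o ∧ p.1 ≠ [] ∧ p.1.getLast? = some o then
      solutionLoop rest p.1.dropLast p.2 (count + 1)
    else count

def solution (order : List Int) : Int := solutionLoop order [] 1 0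

-- ===== PORT B =====
-- B's for-loop with early break: state (taken : set, m, count).
-- 'elif not (1 <= o and o not in taken and all(x in taken for x in range(o+1, m+1))): break'
def solutionAltLoop : List Int → PySem.Set Int → Int → Int → Int
  | [], _, _, count => count
  | o :: rest, taken, m, count =>
    if o > m then solutionAltLoop rest (PySem.Set.add taken o) o (count + 1)
    else if 1 ≤ o ∧ PySem.Set.contains taken o = false ∧
        ((PySem.List.pyRange (o + 1) (m + 1) 1).all (fun x => PySem.Set.contains taken x)) = true then
      solutionAltLoop rest (PySem.Set.add taken o) m (count + 1)
    else count

def solution_alt (order : List Int) : Int := solutionAltLoop order PySem.Set.empty 0 0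

-- ===== PRECONDITION & SPEC =====
def Spec_solution (order : List Int) (out : Int) : Prop := out = solution_alt order
instance (order : List Int) (out : Int) : Decidable (Spec_solution order out) := by unfold Spec_solution; infer_instance

-- ===== CLAIM (what is proved, stated in full; the proofs are below) =====
def Claim_equal_solution : Prop := ∀ (order : List Int), Dom_solution order → Spec_solution order (solution order)

-- ===== LEMMAS AND PROOFS =====

-- For a strictly increasing list, the last element is the member that bounds all members.
theorem getLast?_sorted_iff (s : List Int) (hs : s.Pairwise (· < ·)) (o : Int) :
    (s ≠ [] ∧ s.getLast? = some o) ↔ (o ∈ s ∧ ∀ x ∈ s, x ≤ o) := by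
  constructor
  · rintro ⟨-, hl⟩
    obtain ⟨t, rfl⟩ := List.getLast?_eq_some_iff.mp hl
    have := (List.pairwise_append.mp hs).2.2
    exact ⟨by simp, by
      intro x hx
      rcases List.mem_append.mp hx with h | h
      · exact le_of_lt (this x h o (by simp))
      · simp at h; omega⟩
  · rintro ⟨hmem, hub⟩
    induction s with
    | nil => cases hmem
    | cons a t ih =>
      cases t with
      | nil => simp at hmem ⊢; omega
      | cons b u =>
        have hlt := List.pairwise_cons.mp hs
        have ho : o ∈ b :: u := by
          rcases List.mem_cons.mp hmem with rfl | h
          · exact absurd (hub b (by simp)) (not_le.mpr (hlt.1 b (by simp)))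
          · exact h
        refine ⟨by simp, ?_⟩
        rw [List.getLast?_cons_cons]
        exact ((ih hlt.2 ho (fun x hx => hub x (List.mem_cons_of_mem a hx))).2)

-- The coupling invariant between A's and B's loop states, and the main simulation lemma:
-- A's stack is strictly increasing inside [1, m] and holds exactly the boxes ≤ m not taken.
theorem loop_eq (order : List Int) :
    ∀ (s : List Int) (taken : PySem.Set Int) (m count : Int),
      0 ≤ m → s.Pairwise (· < ·) → (∀ x ∈ s, 1 ≤ x ∧ x ≤ m) →
      (∀ x : Int, x ∈ taken ↔ (1 ≤ x ∧ x ≤ m ∧ x ∉ s)) →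
      solutionLoop order s (m + 1) count = solutionAltLoop order taken m count := by
  induction order with
  | nil => intros; rfl
  | cons o rest ih =>
    intro s taken m count hm hsort hbnd hmem
    by_cases hgt : o > m
    · -- o fresh off the belt: A pushes range(m+1,o) then takes o; B just records o.
      have haddmem : ∀ x : Int, x ∈ PySem.Set.add taken o ↔
          (1 ≤ x ∧ x ≤ o ∧ x ∉ s ++ PySem.List.pyRange (m + 1) o 1) := by
        intro x
        rw [PySem.Set.mem_add, hmem]
        simp only [List.mem_append, PySem.List.mem_pyRange_one]
        by_cases ho : x = o
        · subst ho
          simp only [or_true, true_iff]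
          refine ⟨by omega, le_refl x, fun h => ?_⟩
          rcases h with h | h
          · exact absurd (hbnd x h).2 (by omega)
          · omega
        · simp only [ho, or_false]
          constructor
          · rintro ⟨h1, h2, h3⟩
            exact ⟨h1, by omega, fun h => by rcases h with h | h; exact h3 h; omega⟩
          · rintro ⟨h1, h2, h3⟩
            refine ⟨h1, ?_, fun h => h3 (Or.inl h)⟩
            by_contra hxm
            exact h3 (Or.inr ⟨by omega, by omega⟩)
      by_cases heq : o = m + 1
      · -- direct belt: range(m+1,o) is empty.
        subst heq
        simp only [solutionLoop, solutionAltLoop, lt_irrefl, if_false, if_pos hgt]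
        refine ih s (PySem.Set.add taken (m + 1)) (m + 1) (count + 1) (by omega) hsort
          (fun x hx => ⟨(hbnd x hx).1, by have := (hbnd x hx).2; omega⟩) ?_
        intro x
        have := haddmem x
        rwa [PySem.List.pyRange_one_eq_nil (by omega), List.append_nil] at this
      · -- gap: A extends the stack by m+1 .. o-1 and takes o.
        have hlt : m + 1 < o := by omega
        simp only [solutionLoop, solutionAltLoop, if_pos hlt, if_pos hgt]
        refine ih _ (PySem.Set.add taken o) o (count + 1) (by omega) ?_ ?_ haddmem
        · rw [List.pairwise_append]
          refine ⟨hsort, PySem.List.pairwise_lt_pyRange_one _ _, fun x hx y hy => ?_⟩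
          have := (hbnd x hx).2
          have := (PySem.List.mem_pyRange_one.mp hy).1
          omega
        · intro x hx
          rcases List.mem_append.mp hx with h | h
          · have := hbnd x h; omega
          · have := PySem.List.mem_pyRange_one.mp h; omega
    · -- o ≤ m: A tests the stack top; B tests the interval (o, m].
      have hC : (m + 1 > o ∧ s ≠ [] ∧ s.getLast? = some o) ↔
          (1 ≤ o ∧ PySem.Set.contains taken o = false ∧
            ((PySem.List.pyRange (o + 1) (m + 1) 1).all
              (fun x => PySem.Set.contains taken x)) = true) := by
        rw [show (m + 1 > o ∧ s ≠ [] ∧ s.getLast? = some o) ↔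
              (s ≠ [] ∧ s.getLast? = some o) from ⟨fun h => h.2, fun h => ⟨by omega, h⟩⟩,
          getLast?_sorted_iff s hsort o]
        simp only [List.all_eq_true, PySem.List.mem_pyRange_one, PySem.Set.contains_iff,
          Bool.eq_false_iff, ne_eq, PySem.Set.contains_iff]
        constructor
        · rintro ⟨hos, hub⟩
          have h1o := (hbnd o hos).1
          refine ⟨h1o, fun h => ((hmem o).mp h).2.2 hos, fun x hx => ?_⟩
          refine (hmem x).mpr ⟨by omega, by omega, fun hxs => ?_⟩
          exact absurd (hub x hxs) (by omega)
        · rintro ⟨h1, h2, h3⟩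
          have hos : o ∈ s := by
            by_contra hns
            exact h2 ((hmem o).mpr ⟨h1, by omega, hns⟩)
          refine ⟨hos, fun x hx => ?_⟩
          by_contra hxo
          have := (hbnd x hx)
          exact ((hmem x).mp (h3 x ⟨by omega, by omega⟩)).2.2 hx
      by_cases hpop : m + 1 > o ∧ s ≠ [] ∧ s.getLast? = some o
      · -- pop/take: A drops its last stack element; B records o as taken.
        obtain ⟨t, hts⟩ := List.getLast?_eq_some_iff.mp hpop.2.2
        have hdr : s.dropLast = t := by rw [hts]; simp
        simp only [solutionLoop, solutionAltLoop, if_neg (by omega : ¬ (m + 1 < o)),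
          if_neg (by omega : ¬ (m + 1 = o)), if_pos hpop, if_neg (not_lt.mpr (by omega : o ≤ m)),
          if_pos (hC.mp hpop)]
        rw [hdr]
        have hpw := List.pairwise_append.mp (hts ▸ hsort)
        refine ih t (PySem.Set.add taken o) m (count + 1) hm hpw.1
          (fun x hx => hbnd x (hts ▸ List.mem_append_left _ hx)) ?_
        intro x
        rw [PySem.Set.mem_add, hmem, hts]
        simp only [List.mem_append, List.mem_singleton]
        by_cases hxo : x = o
        · subst hxo
          simp only [or_true, true_iff]
          have hob := hbnd x (hts ▸ List.mem_append_right _ (by simp))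
          exact ⟨hob.1, hob.2, fun h => absurd (hpw.2.2 x h x (by simp)) (lt_irrefl x)⟩
        · simp only [hxo, or_false]
      · -- break: both return count.
        simp only [solutionLoop, solutionAltLoop, if_neg (by omega : ¬ (m + 1 < o)),
          if_neg (by omega : ¬ (m + 1 = o)), if_neg hpop, if_neg (not_lt.mpr (by omega : o ≤ m)),
          if_neg (fun h => hpop (hC.mpr h))]

-- ===== VERDICT (by name: the statement is the Claim_ definition above) =====
theorem solution_spec : Claim_equal_solution := by
  intro order _
  unfold Spec_solution solution solution_alt
  exact loop_eq order [] PySem.Set.empty 0 0 le_rfl (by simp) (by simp) (by intro x; simp [PySem.Set.empty]; omega)
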